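-- pv_equiv track=rewrite | github.com/jackonedev/sweet_cotton | app/main/creacion_features.py | procesamiento_texto_ORIGINAL
-- ===== SOURCE A (Python) =====
-- def filtrado_palabras(data: list, lista_eliminar: list) -> list:
--     """Función para filtrar palabras de una lista de strings"""
--
--     final_batch = []
--     for comentario in data:
--         if not isinstance(comentario, str):
--             continue
--         # Verificar que el twit tenga al menos 2 palabras
--         comentario = comentario.strip()
--
--         lista_palabras = comentario.split()
--
--         # remove empty strings
--         if not lista_palabras:
--             continue
--
--         # # remove config words
--         lista_palabras = [palabra for palabra in lista_palabras if palabra not in lista_eliminar]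
--         final_batch.append(" ".join(lista_palabras))
--
--     return final_batch
--
-- def procesamiento_texto_ORIGINAL(batch: list, lista_eliminar: list) -> list:
--     """
--     Elimina registros durante la limpieza
--
--     Procesamiento (convencional) para comentarios en Twitter
--     Elimina palabras por medio de parámetros y realiza limpieza
--
--     """
--     def tokenize(text):
--         tokens = [word for word in text.split(" ")]
--         return tokens
--
--     final_batch = []
--     for comentario in batch:
--         if not isinstance(comentario, str):
--             continue
--
--         # Verificar que el twit tenga al menos 2 palabras
--         comentario = comentario.strip()
--         # si el comentario tiene 2 palabras o menos se descarta
--         tokens = tokenize(comentario)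
--         if len(tokens) <= 2:
--             continue
--
--         lista_palabras = comentario.split()
--         # remove words with less than 1 characters # río - si y no
--         lista_palabras = [palabra for palabra in lista_palabras if len(palabra) >= 2]
--
--         # remove empty strings
--         if not lista_palabras:
--             continue
--         # remove digits
--         lista_palabras = [palabra for palabra in lista_palabras if not palabra.isdigit()]#TODO: la eliminacion de digitos debe hacerse antes de eliminar los simbolos, cosa de conservar los $120 y 15%
--
--         final_batch.append(" ".join(lista_palabras))
--
--     ## remove config words
--     if bool(lista_eliminar) != False:
--         final_batch = filtrado_palabras(final_batch, lista_eliminar)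
--
--     return final_batch
-- ===== SOURCE B (Python) =====
-- def procesamiento_texto_ORIGINAL(batch: list, lista_eliminar: list) -> list:
--     """Single pass: the config-word removal (filtrado_palabras) is folded into the main loop."""
--     drop = bool(lista_eliminar)
--     final_batch = []
--     for comentario in batch:
--         if not isinstance(comentario, str):
--             continue
--         comentario = comentario.strip()
--         # discard comments with 2 or fewer tokens (split on single spaces)
--         if len(comentario.split(" ")) <= 2:
--             continue
--         lista_palabras = [p for p in comentario.split() if len(p) >= 2]
--         if not lista_palabras:
--             continue
--         joined = " ".join(p for p in lista_palabras if not p.isdigit())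
--         if drop:
--             # inline config-word pass: re-split; an all-whitespace/empty result is dropped
--             palabras = joined.split()
--             if not palabras:
--                 continue
--             final_batch.append(" ".join(p for p in palabras if p not in lista_eliminar))
--         else:
--             final_batch.append(joined)
--     return final_batch
-- ===== Notes on version B (the rewrite author's own statement) =====
-- stated objective: simpler
-- what changed: The second pass over the intermediate list (filtrado_palabras) is folded into the main loop with lista_eliminar's truthiness precomputed, so the batch is traversed once and the helper function disappears.
import Mathlib
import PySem

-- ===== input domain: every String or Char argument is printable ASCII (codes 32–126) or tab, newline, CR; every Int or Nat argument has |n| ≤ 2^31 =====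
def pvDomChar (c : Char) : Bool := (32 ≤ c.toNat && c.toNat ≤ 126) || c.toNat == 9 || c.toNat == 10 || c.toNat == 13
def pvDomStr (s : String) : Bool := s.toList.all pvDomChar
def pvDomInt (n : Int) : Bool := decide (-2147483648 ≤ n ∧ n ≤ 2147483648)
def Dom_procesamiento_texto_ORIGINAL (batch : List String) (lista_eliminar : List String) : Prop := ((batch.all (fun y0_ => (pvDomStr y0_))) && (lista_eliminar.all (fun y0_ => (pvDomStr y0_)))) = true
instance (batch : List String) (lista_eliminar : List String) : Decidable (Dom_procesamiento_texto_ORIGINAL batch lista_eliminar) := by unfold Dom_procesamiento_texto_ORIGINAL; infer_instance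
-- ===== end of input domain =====

-- B folds the second pass (filtrado_palabras) into the main loop: one traversal of the batch, no helper ("simpler").

-- ===== PORT A =====
-- port of filtrado_palabras (elements are always str here, so the isinstance guard is vacuous)
def filtrado_palabras (data : List String) (lista_eliminar : List String) : List String :=
  data.foldl (fun final_batch comentario =>
    let c := PySem.Str.strip comentario
    let lista_palabras := PySem.Str.split₀ c
    if lista_palabras.isEmpty then final_batch
    else final_batch ++ [PySem.Str.join " " (lista_palabras.filter (fun p => !(lista_eliminar.contains p)))]) []

def procesamiento_texto_ORIGINAL (batch : List String) (lista_eliminar : List String) : List String :=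
  let final_batch := batch.foldl (fun final_batch comentario =>
    let c := PySem.Str.strip comentario
    -- tokenize: c.split(" ")
    let tokens := PySem.Chars.splitOn c.toList [' ']
    if tokens.length ≤ 2 then final_batch
    else
      let lista_palabras := (PySem.Str.split₀ c).filter (fun p => 2 ≤ PySem.Str.len p)
      if lista_palabras.isEmpty then final_batch
      else final_batch ++
        [PySem.Str.join " " (lista_palabras.filter (fun p => !(PySem.Str.strIsdigit p)))]) []
  if !lista_eliminar.isEmpty then filtrado_palabras final_batch lista_eliminar else final_batch

-- ===== PORT B =====
def procesamiento_texto_ORIGINAL_alt (batch : List String) (lista_eliminar : List String) : List String :=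
  let drop := !lista_eliminar.isEmpty
  batch.foldl (fun final_batch comentario =>
    let c := PySem.Str.strip comentario
    if (PySem.Chars.splitOn c.toList [' ']).length ≤ 2 then final_batch
    else
      let lista_palabras := (PySem.Str.split₀ c).filter (fun p => 2 ≤ PySem.Str.len p)
      if lista_palabras.isEmpty then final_batch
      else
        let joined := PySem.Str.join " " (lista_palabras.filter (fun p => !(PySem.Str.strIsdigit p)))
        if drop then
          let palabras := PySem.Str.split₀ joined
          if palabras.isEmpty then final_batch
          else final_batch ++ [PySem.Str.join " " (palabras.filter (fun p => !(lista_eliminar.contains p)))]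
        else final_batch ++ [joined]) []

-- ===== PRECONDITION & SPEC =====
def Spec_procesamiento_texto_ORIGINAL (batch : List String) (lista_eliminar : List String) (out : List String) : Prop := out = procesamiento_texto_ORIGINAL_alt batch lista_eliminar
instance (batch : List String) (lista_eliminar : List String) (out : List String) : Decidable (Spec_procesamiento_texto_ORIGINAL batch lista_eliminar out) := by unfold Spec_procesamiento_texto_ORIGINAL; infer_instance

-- ===== CLAIM (what is proved, stated in full; the proofs are below) =====
def Claim_equal_procesamiento_texto_ORIGINAL : Prop := ∀ (batch : List String) (lista_eliminar : List String), Dom_procesamiento_texto_ORIGINAL batch lista_eliminar → Spec_procesamiento_texto_ORIGINAL batch lista_eliminar (procesamiento_texto_ORIGINAL batch lista_eliminar)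

-- ===== LEMMAS AND PROOFS =====

-- split() ignores whitespace padding: split₀.go over an all-whitespace list / suffix
theorem go_all_space (spaces : List Char) (h : ∀ c ∈ spaces, PySem.Chars.isspace c = true)
    (cur : List Char) (acc : List (List Char)) :
    PySem.Chars.split₀.go spaces cur acc = PySem.Chars.split₀.go [] cur acc := by
  induction spaces generalizing cur acc with
  | nil => rfl
  | cons c rest ih =>
    have hc : PySem.Chars.isspace c = true := h c (by simp)
    have hrest : ∀ x ∈ rest, PySem.Chars.isspace x = true := fun x hx => h x (by simp [hx])
    simp only [PySem.Chars.split₀.go, hc, if_true]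
    by_cases hcur : cur.isEmpty = true
    · rw [if_pos hcur, ih hrest]
      simp [PySem.Chars.split₀.go, List.isEmpty_iff.mp hcur]
    · rw [if_neg hcur, ih hrest]
      simp [PySem.Chars.split₀.go, hcur]

theorem go_append_space (t spaces : List Char) (h : ∀ c ∈ spaces, PySem.Chars.isspace c = true)
    (cur : List Char) (acc : List (List Char)) :
    PySem.Chars.split₀.go (t ++ spaces) cur acc = PySem.Chars.split₀.go t cur acc := by
  induction t generalizing cur acc with
  | nil => simpa using go_all_space spaces h cur acc
  | cons c rest ih =>
    simp only [List.cons_append, PySem.Chars.split₀.go]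
    split_ifs <;> exact ih _ _

theorem split₀_rstrip (cs : List Char) :
    PySem.Chars.split₀ (PySem.Chars.rstrip cs) = PySem.Chars.split₀ cs := by
  have hdec : cs = PySem.Chars.rstrip cs ++ (List.takeWhile PySem.Chars.isspace cs.reverse).reverse := by
    unfold PySem.Chars.rstrip
    conv_lhs => rw [← List.reverse_reverse cs,
      ← List.takeWhile_append_dropWhile (p := PySem.Chars.isspace) (l := cs.reverse)]
    rw [List.reverse_append]
  conv_rhs => rw [hdec]
  unfold PySem.Chars.split₀
  rw [go_append_space]
  intro c hc
  exact List.mem_takeWhile_imp (List.mem_reverse.mp hc)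

theorem split₀_lstrip (cs : List Char) :
    PySem.Chars.split₀ (PySem.Chars.lstrip cs) = PySem.Chars.split₀ cs := by
  unfold PySem.Chars.split₀ PySem.Chars.lstrip
  induction cs with
  | nil => rfl
  | cons c rest ih =>
    by_cases hc : PySem.Chars.isspace c
    · rw [List.dropWhile_cons_of_pos hc, ih]
      simp [PySem.Chars.split₀.go, hc]
    · rw [List.dropWhile_cons_of_neg hc]

theorem split₀_strip (s : String) :
    PySem.Str.split₀ (PySem.Str.strip s) = PySem.Str.split₀ s := by
  simp only [PySem.Str.split₀, PySem.Str.strip, PySem.Chars.strip, String.toList_ofList]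
  rw [split₀_rstrip, split₀_lstrip]

-- per-element contribution of A's main loop
def stepA (comentario : String) : List String :=
  let c := PySem.Str.strip comentario
  if (PySem.Chars.splitOn c.toList [' ']).length ≤ 2 then []
  else
    let lista_palabras := (PySem.Str.split₀ c).filter (fun p => 2 ≤ PySem.Str.len p)
    if lista_palabras.isEmpty then []
    else [PySem.Str.join " " (lista_palabras.filter (fun p => !(PySem.Str.strIsdigit p)))]

-- per-element contribution of filtrado_palabras
def stepF (lista_eliminar : List String) (comentario : String) : List String :=
  let lista_palabras := PySem.Str.split₀ (PySem.Str.strip comentario)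
  if lista_palabras.isEmpty then []
  else [PySem.Str.join " " (lista_palabras.filter (fun p => !(lista_eliminar.contains p)))]

-- per-element contribution of B's loop when lista_eliminar is truthy
def stepB (lista_eliminar : List String) (comentario : String) : List String :=
  let c := PySem.Str.strip comentario
  if (PySem.Chars.splitOn c.toList [' ']).length ≤ 2 then []
  else
    let lista_palabras := (PySem.Str.split₀ c).filter (fun p => 2 ≤ PySem.Str.len p)
    if lista_palabras.isEmpty then []
    else
      let joined := PySem.Str.join " " (lista_palabras.filter (fun p => !(PySem.Str.strIsdigit p)))
      let palabras := PySem.Str.split₀ joined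
      if palabras.isEmpty then []
      else [PySem.Str.join " " (palabras.filter (fun p => !(lista_eliminar.contains p)))]

theorem mainloop_eq_flatMap (batch : List String) :
    batch.foldl (fun final_batch comentario =>
      let c := PySem.Str.strip comentario
      let tokens := PySem.Chars.splitOn c.toList [' ']
      if tokens.length ≤ 2 then final_batch
      else
        let lista_palabras := (PySem.Str.split₀ c).filter (fun p => 2 ≤ PySem.Str.len p)
        if lista_palabras.isEmpty then final_batch
        else final_batch ++
          [PySem.Str.join " " (lista_palabras.filter (fun p => !(PySem.Str.strIsdigit p)))]) []
    = batch.flatMap stepA :=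
  calc _ = batch.foldl (fun acc x => acc ++ stepA x) [] := by
        apply PySem.List.foldl_congr_mem
        intro acc x _
        simp only [stepA]
        split_ifs <;> simp
    _ = [] ++ batch.flatMap stepA := PySem.List.foldl_append_eq_flatMap _ _ _
    _ = batch.flatMap stepA := List.nil_append _

theorem filtrado_eq_flatMap (data lista_eliminar : List String) :
    filtrado_palabras data lista_eliminar = data.flatMap (stepF lista_eliminar) :=
  calc _ = data.foldl (fun acc x => acc ++ stepF lista_eliminar x) [] := by
        apply PySem.List.foldl_congr_mem
        intro acc x _
        simp only [stepF]
        split_ifs <;> simp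
    _ = [] ++ data.flatMap (stepF lista_eliminar) := PySem.List.foldl_append_eq_flatMap _ _ _
    _ = data.flatMap (stepF lista_eliminar) := List.nil_append _

theorem altloop_eq_flatMap (batch lista_eliminar : List String) :
    List.foldl (fun final_batch comentario =>
      if (PySem.Chars.splitOn (PySem.Str.strip comentario).toList [' ']).length ≤ 2 then final_batch
      else
        if (List.filter (fun p => decide (2 ≤ PySem.Str.len p)) (PySem.Str.split₀ (PySem.Str.strip comentario))).isEmpty = true then final_batch
        else
          if (PySem.Str.split₀ (PySem.Str.join " " (List.filter (fun p => !PySem.Str.strIsdigit p) (List.filter (fun p => decide (2 ≤ PySem.Str.len p)) (PySem.Str.split₀ (PySem.Str.strip comentario)))))).isEmpty = true then final_batch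
          else final_batch ++ [PySem.Str.join " " (List.filter (fun p => !lista_eliminar.contains p) (PySem.Str.split₀ (PySem.Str.join " " (List.filter (fun p => !PySem.Str.strIsdigit p) (List.filter (fun p => decide (2 ≤ PySem.Str.len p)) (PySem.Str.split₀ (PySem.Str.strip comentario)))))))]) [] batch
    = batch.flatMap (stepB lista_eliminar) :=
  calc _ = batch.foldl (fun acc x => acc ++ stepB lista_eliminar x) [] := by
        apply PySem.List.foldl_congr_mem
        intro acc x _
        simp only [stepB]
        split_ifs <;> simp
    _ = [] ++ batch.flatMap (stepB lista_eliminar) := PySem.List.foldl_append_eq_flatMap _ _ _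
    _ = batch.flatMap (stepB lista_eliminar) := List.nil_append _

theorem stepA_flatMap_stepF (lista_eliminar : List String) (comentario : String) :
    (stepA comentario).flatMap (stepF lista_eliminar) = stepB lista_eliminar comentario := by
  simp only [stepA, stepB]
  split_ifs with h1 h2 h3
  · simp
  · simp
  · rw [List.flatMap_cons, List.flatMap_nil, List.append_nil]
    simp only [stepF]
    rw [split₀_strip, if_pos h3]
  · rw [List.flatMap_cons, List.flatMap_nil, List.append_nil]
    simp only [stepF]
    rw [split₀_strip, if_neg h3]

-- ===== VERDICT (by name: the statement is the Claim_ definition above) =====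
theorem procesamiento_texto_ORIGINAL_spec : Claim_equal_procesamiento_texto_ORIGINAL := by
  intro batch lista_eliminar _
  unfold Spec_procesamiento_texto_ORIGINAL procesamiento_texto_ORIGINAL procesamiento_texto_ORIGINAL_alt
  by_cases hle : lista_eliminar.isEmpty
  · simp only [hle, Bool.not_true, if_false, Bool.false_eq_true]
  · have hle' : lista_eliminar.isEmpty = false := by simpa using hle
    simp only [hle', Bool.not_false, if_true]
    rw [mainloop_eq_flatMap, filtrado_eq_flatMap, List.flatMap_assoc, altloop_eq_flatMap batch lista_eliminar]
    exact List.flatMap_congr (fun x _ => stepA_flatMap_stepF lista_eliminar x)
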